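-- pv_equiv track=rewrite | github.com/bcgood214/TicTacToe | helper.py | strtomat
-- ===== SOURCE A (Python) =====
-- def strtomat(s):
--     state = [[], [], []]
--     i = 0
--     for char in s:
--         ind = None
--         if i >= 6:
--             ind = 2
--         elif i >= 3:
--             ind = 1
--         else:
--             ind = 0
--
--         if char == 'n':
--             state[ind].append(None)
--         else:
--             state[ind].append(char)
--
--         i += 1
--
--     return state
-- ===== SOURCE B (Python) =====
-- def strtomat(s):
--     f = lambda c: None if c == 'n' else c
--     return [[f(c) for c in s[0:3]], [f(c) for c in s[3:6]], [f(c) for c in s[6:]]]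
-- ===== Notes on version B (the rewrite author's own statement) =====
-- stated objective: simpler
-- what changed: Replaces the flat indexed loop that dispatches each character into one of three buckets with up-front slicing into the three row chunks (first three, next three, rest) each mapped by the char-to-None/char rule.
import Mathlib
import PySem

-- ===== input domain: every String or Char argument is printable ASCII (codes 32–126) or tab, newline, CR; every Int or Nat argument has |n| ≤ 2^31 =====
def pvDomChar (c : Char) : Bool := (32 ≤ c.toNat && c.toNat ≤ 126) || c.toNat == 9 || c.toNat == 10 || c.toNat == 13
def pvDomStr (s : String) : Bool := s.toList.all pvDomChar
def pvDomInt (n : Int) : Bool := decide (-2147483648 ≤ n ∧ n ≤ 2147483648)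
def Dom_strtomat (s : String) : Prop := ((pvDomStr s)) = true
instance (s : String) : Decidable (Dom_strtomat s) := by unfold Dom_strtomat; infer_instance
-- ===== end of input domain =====

-- B replaces A's flat indexed dispatch loop by slicing the string into its three row
-- chunks up front and mapping each chunk; objective: simpler.

-- ===== PORT A =====
-- A's loop state: the three rows of `state` (as a triple) together with the counter i.
def pvStepA (acc : (List (Option String) × List (Option String) × List (Option String)) × Int)
    (c : Char) : (List (Option String) × List (Option String) × List (Option String)) × Int :=
  let st := acc.1
  let i := acc.2
  let ind : Int := if i ≥ 6 then 2 else if i ≥ 3 then 1 else 0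
  -- state[ind].append(None) / state[ind].append(char)
  let v : Option String := if c == 'n' then none else some (String.ofList [c])
  let st' :=
    if ind = 2 then (st.1, st.2.1, st.2.2 ++ [v])
    else if ind = 1 then (st.1, st.2.1 ++ [v], st.2.2)
    else (st.1 ++ [v], st.2.1, st.2.2)
  (st', i + 1)

def strtomat (s : String) : List (List (Option String)) :=
  let r := s.toList.foldl pvStepA (([], [], []), 0)
  [r.1.1, r.1.2.1, r.1.2.2]

-- ===== PORT B =====
def pvRowB (cs : List Char) : List (Option String) :=
  cs.map (fun c => if c == 'n' then none else some (String.ofList [c]))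

def strtomat_alt (s : String) : List (List (Option String)) :=
  [ pvRowB (PySem.List.slice s.toList (some 0) (some 3)),
    pvRowB (PySem.List.slice s.toList (some 3) (some 6)),
    pvRowB (PySem.List.slice s.toList (some 6) none) ]

-- ===== PRECONDITION & SPEC =====
def Spec_strtomat (s : String) (out : List (List (Option String))) : Prop := out = strtomat_alt s
instance (s : String) (out : List (List (Option String))) : Decidable (Spec_strtomat s out) := by unfold Spec_strtomat; infer_instance

-- ===== CLAIM (what is proved, stated in full; the proofs are below) =====
def Claim_equal_strtomat : Prop := ∀ (s : String), Dom_strtomat s → Spec_strtomat s (strtomat s)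

-- ===== LEMMAS AND PROOFS =====

-- the per-character value both programs place in the board
def pvF (c : Char) : Option String := if c == 'n' then none else some (String.ofList [c])

lemma pvFoldA_spec (l : List Char) (j : Nat) (r0 r1 r2 : List (Option String)) :
    l.foldl pvStepA ((r0, r1, r2), (j : Int)) =
      ((r0 ++ (l.take (3 - j)).map pvF,
        r1 ++ (((l.drop (3 - j)).take (6 - max j 3)).map pvF),
        r2 ++ (l.drop (6 - j)).map pvF), (j : Int) + l.length) := by
  induction l generalizing j r0 r1 r2 with
  | nil => simp
  | cons c l ih =>
    by_cases h6 : 6 ≤ j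
    · have h6' : (6:Int) ≤ (j:Int) := by exact_mod_cast h6
      have hstep : pvStepA ((r0, r1, r2), (j : Int)) c = ((r0, r1, r2 ++ [pvF c]), ((j + 1 : Nat) : Int)) := by
        simp [pvStepA, pvF, ge_iff_le, h6']
      have h0 : 3 - j = 0 := by omega
      have h1 : 6 - max j 3 = 0 := by omega
      have h2 : 6 - j = 0 := by omega
      have h0' : 3 - (j + 1) = 0 := by omega
      have h1' : 6 - max (j + 1) 3 = 0 := by omega
      have h2' : 6 - (j + 1) = 0 := by omega
      simp only [List.foldl_cons, hstep, ih, h0, h1, h2, h0', h1', h2', List.take_zero,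
        List.drop_zero, List.map_nil, List.append_nil, List.map_cons, List.length_cons,
        Prod.mk.injEq]
      and_intros <;> first | rfl | omega | simp
    · by_cases h3 : 3 ≤ j
      · have h6' : ¬ (6:Int) ≤ (j:Int) := by omega
        have h3' : (3:Int) ≤ (j:Int) := by exact_mod_cast h3
        have hstep : pvStepA ((r0, r1, r2), (j : Int)) c = ((r0, r1 ++ [pvF c], r2), ((j + 1 : Nat) : Int)) := by
          simp [pvStepA, pvF, ge_iff_le, h6', h3']
        have h0 : 3 - j = 0 := by omega
        have h0' : 3 - (j + 1) = 0 := by omega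
        have ht : 6 - max j 3 = (6 - max (j + 1) 3) + 1 := by omega
        have hd : 6 - j = (6 - (j + 1)) + 1 := by omega
        simp only [List.foldl_cons, hstep, ih, h0, h0', ht, hd, List.drop_zero,
          List.take_succ_cons, List.drop_succ_cons, List.map_cons, List.length_cons,
          Prod.mk.injEq]
        and_intros <;> first | rfl | omega | simp
      · have h6' : ¬ (6:Int) ≤ (j:Int) := by omega
        have h3' : ¬ (3:Int) ≤ (j:Int) := by omega
        have hstep : pvStepA ((r0, r1, r2), (j : Int)) c = ((r0 ++ [pvF c], r1, r2), ((j + 1 : Nat) : Int)) := by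
          simp [pvStepA, pvF, ge_iff_le, h6', h3']
        have h0 : 3 - j = (3 - (j + 1)) + 1 := by omega
        have hm : max j 3 = 3 := by omega
        have hm' : max (j + 1) 3 = 3 := by omega
        have hd : 6 - j = (6 - (j + 1)) + 1 := by omega
        simp only [List.foldl_cons, hstep, ih, h0, hm, hm', hd, List.take_succ_cons,
          List.drop_succ_cons, List.map_cons, List.length_cons, Prod.mk.injEq]
        and_intros <;> first | rfl | omega | simp

-- ===== VERDICT (by name: the statement is the Claim_ definition above) =====
theorem strtomat_spec : Claim_equal_strtomat := by
  intro s _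
  unfold Spec_strtomat strtomat strtomat_alt
  have h := pvFoldA_spec s.toList 0 [] [] []
  simp only [Nat.cast_zero] at h
  have hF : (fun c => if c == 'n' then none else some (String.ofList [c])) = pvF := rfl
  simp only [h, List.nil_append, Nat.sub_zero,
    Nat.max_eq_right (by omega : (0 : Nat) ≤ 3)]
  rw [PySem.List.slice_toNat s.toList (by norm_num) (by norm_num),
      PySem.List.slice_toNat s.toList (by norm_num) (by norm_num),
      PySem.List.slice_from s.toList (by norm_num)]
  have h0n : (0 : Int).toNat = 0 := rfl
  have h3n : (3 : Int).toNat = 3 := rfl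
  have h6n : (6 : Int).toNat = 6 := rfl
  simp only [pvRowB, hF, h0n, h3n, h6n]
  simp
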